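-- pv_equiv track=rewrite | github.com/samlevine03/advent-of-code-2024 | day2.py | report_is_valid
-- ===== SOURCE A (Python) =====
-- def report_is_valid(report: list[int]) -> bool:
--     if report[0] < report[1]:
--         increasing = True
--     elif report[0] > report[1]:
--         increasing = False
--     else:
--         return False
--
--     for i, level in enumerate(report):
--         if i == 0:
--             continue
--         if abs(level - report[i - 1]) > 3:
--             return False
--         if level > report[i - 1] and not increasing:
--             return False
--         if level < report[i - 1] and increasing:
--             return False
--         if level == report[i - 1]:
--             return False
--
--     return True
-- ===== SOURCE B (Python) =====
-- def report_is_valid(report: list[int]) -> bool: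
--     s = sorted(report)
--     if report != s and report != s[::-1]:
--         return False
--     if len(set(report)) != len(report):
--         return False
--     return all(b - a <= 3 for a, b in zip(s, s[1:]))
-- ===== Notes on version B (the rewrite author's own statement) =====
-- stated objective: alternative
-- what changed: B decides validity globally by comparing the report with its sorted (or reverse-sorted) copy, checking strictness via set cardinality, and bounding adjacent gaps on the sorted copy, instead of A's direction-flagged single pass with per-element early exits.
import Mathlib
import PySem

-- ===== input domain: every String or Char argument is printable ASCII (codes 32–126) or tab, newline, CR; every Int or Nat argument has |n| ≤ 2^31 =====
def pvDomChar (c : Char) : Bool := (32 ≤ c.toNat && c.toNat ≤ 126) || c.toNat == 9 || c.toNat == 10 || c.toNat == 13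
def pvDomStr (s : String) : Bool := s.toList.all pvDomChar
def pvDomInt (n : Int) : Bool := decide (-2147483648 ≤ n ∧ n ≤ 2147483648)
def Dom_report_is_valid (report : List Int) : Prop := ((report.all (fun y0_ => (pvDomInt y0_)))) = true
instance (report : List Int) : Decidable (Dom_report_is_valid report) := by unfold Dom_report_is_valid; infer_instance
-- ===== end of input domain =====

-- B replaces A's direction-flagged early-exit pass by a sorted-copy comparison plus a set cardinality check; objective: alternative.

-- ===== PORT A =====
-- the for-loop over enumerate(report) with its early returns; pyGet? report (i-1) is report[i-1]
def reportLoopA (report : List Int) (increasing : Bool) : List (Int × Int) → Bool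
  | [] => true
  | (i, level) :: rest =>
    if i == 0 then reportLoopA report increasing rest
    else
      match PySem.List.pyGet? report (i - 1) with
      | none => false   -- unreachable: i-1 is always in range
      | some prev =>
        if 3 < (level - prev).natAbs then false
        else if level > prev && !increasing then false
        else if level < prev && increasing then false
        else if level == prev then false
        else reportLoopA report increasing rest

def report_is_valid (report : List Int) : Bool :=
  match PySem.List.pyGet? report 0, PySem.List.pyGet? report 1 with
  | some r0, some r1 =>
    if r0 < r1 then reportLoopA report true (PySem.List.enumerate report)
    else if r0 > r1 then reportLoopA report false (PySem.List.enumerate report)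
    else false
  | _, _ => false   -- Python raises IndexError here; excluded by Pre_

-- ===== PORT B =====
def report_is_valid_alt (report : List Int) : Bool :=
  let s := PySem.List.sorted report (fun x => x) false
  -- s[::-1] is s.reverse
  if !(report == s) && !(report == s.reverse) then false
  else if !((PySem.Set.ofList report).length == report.length) then false
  else ((List.zip s (PySem.List.slice s (some 1) none)).map (fun p => p.2 - p.1)).all
        (fun d => d ≤ 3)

-- ===== PRECONDITION & SPEC =====
-- Python A raises IndexError when the report has fewer than two levels (report[0]/report[1]).
def Pre_report_is_valid (report : List Int) : Prop := 2 ≤ report.length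
instance (report : List Int) : Decidable (Pre_report_is_valid report) := by
  unfold Pre_report_is_valid; infer_instance

def pvWitness_report_is_valid : List Int := [1, 3, 4]

def Spec_report_is_valid (report : List Int) (out : Bool) : Prop := out = report_is_valid_alt report
instance (report : List Int) (out : Bool) : Decidable (Spec_report_is_valid report out) := by
  unfold Spec_report_is_valid; infer_instance

-- ===== CLAIM (what is proved, stated in full; the proofs are below) =====
def Claim_equal_report_is_valid : Prop := ∀ (report : List Int), Dom_report_is_valid report → Pre_report_is_valid report → Spec_report_is_valid report (report_is_valid report)

-- ===== LEMMAS AND PROOFS =====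

-- single-step check capturing one iteration of A's loop body
def stepAll (inc : Bool) : Int → List Int → Bool
  | _, [] => true
  | prev, x :: rest =>
    if 3 < (x - prev).natAbs then false
    else if x > prev && !inc then false
    else if x < prev && inc then false
    else if x == prev then false
    else stepAll inc x rest

-- A's loop over the enumerated suffix starting at index k equals stepAll from the k-1 element
lemma loopA_eq_stepAll (full : List Int) (inc : Bool) :
    ∀ (suf : List Int) (k : Nat) (prev : Int),
      1 ≤ k → full.drop k = suf → full[k-1]? = some prev →
      reportLoopA full inc (PySem.List.enumerate suf (k : Int)) = stepAll inc prev suf := by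
  intro suf
  induction suf with
  | nil => intro k prev _ _ _; simp [PySem.List.enumerate, reportLoopA, stepAll]
  | cons x rest ih =>
    intro k prev hk hdrop hprev
    have hk0 : ¬ ((k : Int) == 0) = true := by simp; omega
    have hx : full[k]? = some x := by
      have := congrArg (fun l => l[0]?) hdrop
      simpa using this
    have hget : PySem.List.pyGet? full ((k : Int) - 1) = some prev := by
      have : ((k : Int) - 1) = ((k - 1 : Nat) : Int) := by omega
      rw [this, PySem.List.pyGet?_natCast]
      simpa [PySem.List.pyIdx?] using hprev
    rw [PySem.List.enumerate_cons]
    simp only [reportLoopA, hk0, hget]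
    have hrec : reportLoopA full inc (PySem.List.enumerate rest ((k : Int) + 1))
        = stepAll inc x rest := by
      have hdrop' : full.drop (k + 1) = rest := by
        rw [← List.drop_drop]
        rw [hdrop]; rfl
      have := ih (k + 1) x (by omega) hdrop' (by simpa using hx)
      simpa using this
    simp only [stepAll]
    split_ifs <;> simp_all

-- stepAll is the chain of 'strict step of size ≤ 3 in the given direction'
lemma stepAll_true_iff : ∀ (xs : List Int) (prev : Int),
    stepAll true prev xs = true ↔ List.IsChain (fun a b => a < b ∧ b - a ≤ 3) (prev :: xs) := by
  intro xs
  induction xs with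
  | nil => intro prev; simp [stepAll]
  | cons x rest ih =>
    intro prev
    rw [List.isChain_cons_cons]
    simp only [stepAll]
    split_ifs with h1 h2 h3 h4 <;> simp_all <;> omega

lemma stepAll_false_iff : ∀ (xs : List Int) (prev : Int),
    stepAll false prev xs = true ↔ List.IsChain (fun a b => b < a ∧ a - b ≤ 3) (prev :: xs) := by
  intro xs
  induction xs with
  | nil => intro prev; simp [stepAll]
  | cons x rest ih =>
    intro prev
    rw [List.isChain_cons_cons]
    simp only [stepAll]
    split_ifs with h1 h2 h3 h4 <;> simp_all <;> omega

-- B's gap scan over zip(s, s[1:]) is the 'gap ≤ 3' chain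
lemma gaps_all_iff : ∀ (xs : List Int),
    ((List.zip xs (xs.drop 1)).map (fun p => p.2 - p.1)).all (fun d => d ≤ 3) = true
      ↔ List.IsChain (fun a b => b - a ≤ 3) xs := by
  intro xs
  induction xs with
  | nil => simp
  | cons x rest ih =>
    cases rest with
    | nil => simp
    | cons y t =>
      rw [List.isChain_cons_cons]
      simp only [List.drop_succ_cons, List.drop_zero, List.zip_cons_cons, List.map_cons,
        List.all_cons, Bool.and_eq_true, decide_eq_true_eq]
      rw [← ih]
      simp

-- set(report) is a sublist of report
lemma foldl_add_sublist (l : List Int) : ∀ (s : List Int),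
    (l.foldl PySem.Set.add s).Sublist (s ++ l) := by
  induction l with
  | nil => intro s; simp
  | cons x t ih =>
    intro s
    have h := ih (PySem.Set.add s x)
    refine h.trans ?_
    by_cases hc : PySem.Set.contains s x = true
    · rw [PySem.Set.add, if_pos hc]
      exact (List.append_sublist_append_left s).mpr (List.sublist_cons_self x t)
    · rw [PySem.Set.add, if_neg hc]
      simp

lemma nodup_of_ofList_length (l : List Int)
    (h : (PySem.Set.ofList l).length = l.length) : l.Nodup := by
  have hsub : (PySem.Set.ofList l).Sublist l := by
    have := foldl_add_sublist l []
    simpa [PySem.Set.ofList_eq_foldl] using this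
  have heq : PySem.Set.ofList l = l := hsub.eq_of_length h
  have := PySem.Set.nodup_ofList (xs := l)
  rwa [heq] at this

-- two chains combine into the chain of the conjunction
lemma isChain_and {α : Type} {R S : α → α → Prop} :
    ∀ {l : List α}, List.IsChain R l → List.IsChain S l → List.IsChain (fun a b => R a b ∧ S a b) l := by
  intro l
  induction l with
  | nil => intro _ _; exact List.isChain_nil
  | cons x t ih =>
    cases t with
    | nil => intro _ _; exact List.isChain_singleton x
    | cons y u =>
      intro hR hS
      rw [List.isChain_cons_cons] at hR hS ⊢
      exact ⟨⟨hR.1, hS.1⟩, ih hR.2 hS.2⟩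

theorem report_is_valid_spec_aux (a b : Int) (rest : List Int) :
    report_is_valid (a :: b :: rest) = report_is_valid_alt (a :: b :: rest) := by
  have hBiff : report_is_valid_alt (a :: b :: rest) = true ↔
      (List.IsChain (fun x y => x < y ∧ y - x ≤ 3) (a :: b :: rest) ∨
       List.IsChain (fun x y => y < x ∧ x - y ≤ 3) (a :: b :: rest)) := by
    have hBunf : report_is_valid_alt (a :: b :: rest) = true ↔
        ((a :: b :: rest = PySem.List.sorted (a :: b :: rest) (fun x => x) false ∨
          a :: b :: rest = (PySem.List.sorted (a :: b :: rest) (fun x => x) false).reverse) ∧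
         (PySem.Set.ofList (a :: b :: rest)).length = (a :: b :: rest).length ∧
         List.IsChain (fun x y => y - x ≤ 3)
           (PySem.List.sorted (a :: b :: rest) (fun x => x) false)) := by
      rw [report_is_valid_alt]
      rw [show PySem.List.slice (PySem.List.sorted (a :: b :: rest) (fun x => x) false)
            (some 1) none
          = (PySem.List.sorted (a :: b :: rest) (fun x => x) false).drop 1 by
        rw [PySem.List.slice_from] <;> simp]
      constructor
      · intro h
        by_cases hq1 : ((!(a :: b :: rest == PySem.List.sorted (a :: b :: rest) (fun x => x) false)
            && !(a :: b :: rest == (PySem.List.sorted (a :: b :: rest) (fun x => x) false).reverse)) = true)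
        · rw [if_pos hq1] at h
          exact absurd h (by simp)
        · rw [if_neg hq1] at h
          by_cases hq2 : ((!((PySem.Set.ofList (a :: b :: rest)).length == (a :: b :: rest).length)) = true)
          · rw [if_pos hq2] at h
            exact absurd h (by simp)
          · rw [if_neg hq2] at h
            refine ⟨?_, by simpa using hq2, (gaps_all_iff _).mp h⟩
            by_cases he : a :: b :: rest = PySem.List.sorted (a :: b :: rest) (fun x => x) false
            · exact Or.inl he
            · refine Or.inr (by_contra fun hr => hq1 (by simp [he, hr]))
      · rintro ⟨hc, hlen, hgap⟩
        have h1 : ¬ ((!(a :: b :: rest == PySem.List.sorted (a :: b :: rest) (fun x => x) false)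
            && !(a :: b :: rest == (PySem.List.sorted (a :: b :: rest) (fun x => x) false).reverse)) = true) := by
          simp; intro h; rcases hc with hc | hc
          · exact absurd hc h
          · exact hc
        rw [if_neg h1, if_neg (by simp [hlen])]
        exact (gaps_all_iff _).mpr hgap
    rw [hBunf]
    constructor
    · rintro ⟨hc, hlen, hgap⟩
      have hnd : (a :: b :: rest).Nodup := nodup_of_ofList_length _ hlen
      have hple : (PySem.List.sorted (a :: b :: rest) (fun x => x) false).Pairwise (· ≤ ·) := by
        have := PySem.List.sorted_pairwise (xs := a :: b :: rest) (key := fun x => x)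
        simpa using this
      rcases hc with hc | hc
      · left
        have hple' : (a :: b :: rest).Pairwise (· ≤ ·) := by rw [hc]; exact hple
        have hgap' : List.IsChain (fun x y : Int => y - x ≤ 3) (a :: b :: rest) := by
          rw [hc]; exact hgap
        have hplt : (a :: b :: rest).Pairwise (· < ·) :=
          ((List.Pairwise.and hple' hnd).imp (fun h => lt_of_le_of_ne h.1 h.2))
        have hlt : List.IsChain (fun x y : Int => x < y) (a :: b :: rest) :=
          (List.isChain_iff_pairwise).mpr hplt
        exact isChain_and hlt hgap' 
      · right
        have hs : PySem.List.sorted (a :: b :: rest) (fun x => x) false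
            = (a :: b :: rest).reverse := by
          have := congrArg List.reverse hc
          simpa using this.symm
        have hple' : (a :: b :: rest).reverse.Pairwise (· ≤ ·) := by rw [← hs]; exact hple
        have hgap' : List.IsChain (fun x y : Int => y - x ≤ 3) (a :: b :: rest).reverse := by
          rw [← hs]; exact hgap
        have hndr : (a :: b :: rest).reverse.Nodup := List.nodup_reverse.mpr hnd
        have hplt : (a :: b :: rest).reverse.Pairwise (· < ·) :=
          ((List.Pairwise.and hple' hndr).imp (fun h => lt_of_le_of_ne h.1 h.2))
        have hlt : List.IsChain (fun x y : Int => x < y) (a :: b :: rest).reverse :=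
          (List.isChain_iff_pairwise).mpr hplt
        have hup : List.IsChain (fun x y : Int => x < y ∧ y - x ≤ 3) (a :: b :: rest).reverse :=
          isChain_and hlt hgap'
        rwa [List.isChain_reverse] at hup
    · intro h
      rcases h with h | h
      · have hplt : (a :: b :: rest).Pairwise (· < ·) :=
          (List.isChain_iff_pairwise).mp (h.imp (fun _ _ hr => hr.1))
        have hs : PySem.List.sorted (a :: b :: rest) (fun x => x) false = a :: b :: rest :=
          PySem.List.sorted_eq_of_perm_of_pairwise_lt (a :: b :: rest) (a :: b :: rest)
            (fun x => x) (List.Perm.refl _) hplt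
        have hnd : (a :: b :: rest).Nodup := hplt.imp (fun hr => ne_of_lt hr)
        refine ⟨Or.inl hs.symm, congrArg List.length (PySem.Set.ofList_eq_self_of_nodup _ hnd), ?_⟩
        rw [hs]
        exact h.imp (fun _ _ hr => hr.2)
      · have hup : List.IsChain (fun x y : Int => x < y ∧ y - x ≤ 3) (a :: b :: rest).reverse := by
          rw [List.isChain_reverse]; exact h
        have hplt : (a :: b :: rest).reverse.Pairwise (· < ·) :=
          (List.isChain_iff_pairwise).mp (hup.imp (fun _ _ hr => hr.1))
        have hs : PySem.List.sorted (a :: b :: rest) (fun x => x) false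
            = (a :: b :: rest).reverse :=
          PySem.List.sorted_eq_of_perm_of_pairwise_lt (a :: b :: rest) (a :: b :: rest).reverse
            (fun x => x) (List.reverse_perm _) hplt
        have hnd : (a :: b :: rest).Nodup :=
          List.nodup_reverse.mp (hplt.imp (fun hr => ne_of_lt hr))
        refine ⟨Or.inr (by rw [hs, List.reverse_reverse]),
          congrArg List.length (PySem.Set.ofList_eq_self_of_nodup _ hnd), ?_⟩
        rw [hs]
        exact hup.imp (fun _ _ hr => hr.2)
  -- A side: reduce to stepAll, then to the chains
  have h0 : PySem.List.pyGet? (a :: b :: rest) 0 = some a := by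
    simp [PySem.List.pyGet?, PySem.List.pyIdx?, (by omega : (0:Int) ≤ (rest.length:Int) + 1)]
  have h1 : PySem.List.pyGet? (a :: b :: rest) 1 = some b := by
    simp [PySem.List.pyGet?, PySem.List.pyIdx?]
  have hA : ∀ inc, reportLoopA (a :: b :: rest) inc (PySem.List.enumerate (a :: b :: rest))
      = stepAll inc a (b :: rest) := by
    intro inc
    rw [show PySem.List.enumerate (a :: b :: rest)
        = (0, a) :: PySem.List.enumerate (b :: rest) ((1 : Nat) : Int) by
      simp [PySem.List.enumerate_cons]]
    rw [show reportLoopA (a :: b :: rest) inc ((0, a) :: PySem.List.enumerate (b :: rest) ((1 : Nat) : Int))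
        = reportLoopA (a :: b :: rest) inc (PySem.List.enumerate (b :: rest) ((1 : Nat) : Int)) by
      simp [reportLoopA]]
    exact loopA_eq_stepAll (a :: b :: rest) inc (b :: rest) 1 a (by omega) rfl rfl
  have hAiff : report_is_valid (a :: b :: rest) = true ↔
      (List.IsChain (fun x y => x < y ∧ y - x ≤ 3) (a :: b :: rest) ∨
       List.IsChain (fun x y => y < x ∧ x - y ≤ 3) (a :: b :: rest)) := by
    have hAred : report_is_valid (a :: b :: rest)
        = if a < b then stepAll true a (b :: rest)
          else if a > b then stepAll false a (b :: rest) else false := by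
      rw [report_is_valid, h0, h1]
      show (if a < b then reportLoopA (a :: b :: rest) true (PySem.List.enumerate (a :: b :: rest))
            else if a > b then reportLoopA (a :: b :: rest) false (PySem.List.enumerate (a :: b :: rest))
            else false) = _
      rw [hA, hA]
    rw [hAred]
    by_cases hab : a < b
    · rw [if_pos hab, stepAll_true_iff]
      constructor
      · exact Or.inl
      · rintro (h | h)
        · exact h
        · exact absurd (List.rel_of_isChain_cons_cons h).1 (by omega)
    · rw [if_neg hab]
      by_cases hba : a > b
      · rw [if_pos hba, stepAll_false_iff]
        constructor
        · exact Or.inr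
        · rintro (h | h)
          · exact absurd (List.rel_of_isChain_cons_cons h).1 (by omega)
          · exact h
      · rw [if_neg hba]
        simp only [Bool.false_eq_true, false_iff]
        rintro (h | h)
        · exact absurd (List.rel_of_isChain_cons_cons h).1 (by omega)
        · exact absurd (List.rel_of_isChain_cons_cons h).1 (by omega)
  rw [Bool.eq_iff_iff, hAiff, hBiff]

-- ===== VERDICT (by name: the statement is the Claim_ definition above) =====
theorem report_is_valid_spec : Claim_equal_report_is_valid := by
  intro report _ hpre
  match report, hpre with
  | a :: b :: rest, _ => exact report_is_valid_spec_aux a b rest
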